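-- pv_equiv track=rewrite | github.com/rehanmondal/SPEED-UP-Type | model.py | mistake_count
-- ===== SOURCE A (Python) =====
-- def mistake_count(original, user_test):
--     word_mistake = 0
--
--     for i in range(len(original)):
--         try:
--             if original[i] != user_test[i]:
--                 word_mistake += 1
--         except:
--             word_mistake += 1
--     return word_mistake
-- ===== SOURCE B (Python) =====
-- def mistake_count(original, user_test):
--     matches = sum(1 for a, b in zip(original, user_test) if a == b)
--     return len(original) - matches
-- ===== Notes on version B (the rewrite author's own statement) =====
-- stated objective: simpler
-- what changed: B counts matching positions over the zipped overlap and returns len(original) minus that count, replacing A's index loop with try/except by a complement computation with no indexing or exception handling.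
import Mathlib
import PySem

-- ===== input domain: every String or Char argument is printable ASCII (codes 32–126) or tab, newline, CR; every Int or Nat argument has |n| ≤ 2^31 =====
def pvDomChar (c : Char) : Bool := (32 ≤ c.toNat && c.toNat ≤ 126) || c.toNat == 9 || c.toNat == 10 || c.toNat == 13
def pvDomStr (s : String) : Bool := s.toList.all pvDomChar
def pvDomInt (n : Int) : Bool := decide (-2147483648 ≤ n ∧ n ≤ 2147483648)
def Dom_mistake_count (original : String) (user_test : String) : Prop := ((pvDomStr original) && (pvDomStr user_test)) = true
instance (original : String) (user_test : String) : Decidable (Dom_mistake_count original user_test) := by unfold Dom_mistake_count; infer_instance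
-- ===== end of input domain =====

-- B computes len(original) minus the number of matching zipped positions, with no indexing or exception handling.

-- ===== PORT A =====
-- for i in range(len(original)): try compare original[i], user_test[i]; bare except counts a mistake
def mistake_count (original : String) (user_test : String) : Int :=
  (PySem.List.pyRange 0 (original.toList.length : Int) 1).foldl
    (fun word_mistake i =>
      match PySem.List.pyGet? original.toList i, PySem.List.pyGet? user_test.toList i with
      | some a, some b => if a != b then word_mistake + 1 else word_mistake
      | _, _ => word_mistake + 1)  -- IndexError path of the try/except
    0

-- ===== PORT B =====
def mistake_count_alt (original : String) (user_test : String) : Int :=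
  let matched : Int :=
    ((original.toList.zip user_test.toList).map (fun p => if p.1 == p.2 then (1 : Int) else 0)).sum
  (original.toList.length : Int) - matched

-- ===== PRECONDITION & SPEC =====
def Spec_mistake_count (original : String) (user_test : String) (out : Int) : Prop := out = mistake_count_alt original user_test
instance (original : String) (user_test : String) (out : Int) : Decidable (Spec_mistake_count original user_test out) := by unfold Spec_mistake_count; infer_instance

-- ===== CLAIM (what is proved, stated in full; the proofs are below) =====
def Claim_equal_mistake_count : Prop := ∀ (original : String) (user_test : String), Dom_mistake_count original user_test → Spec_mistake_count original user_test (mistake_count original user_test)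

-- ===== LEMMAS AND PROOFS =====

-- per-index contribution of A's loop body, at a Nat index
def pvStep (o u : List Char) (k : Nat) : Int :=
  match o[k]?, u[k]? with
  | some a, some b => if a != b then (1 : Int) else 0
  | _, _ => 1

-- the same at an Int index, as A's loop sees it
def pvG (o u : List Char) (i : Int) : Int :=
  match PySem.List.pyGet? o i, PySem.List.pyGet? u i with
  | some a, some b => if a != b then (1 : Int) else 0
  | _, _ => 1

lemma pv_key : ∀ (o u : List Char),
    ((List.range o.length).map (pvStep o u)).sum
      = (o.length : Int) - ((o.zip u).map (fun p => if p.1 == p.2 then (1 : Int) else 0)).sum := by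
  intro o
  induction o with
  | nil => intro u; simp
  | cons a o ih =>
    intro u
    rw [List.length_cons, List.range_succ_eq_map, List.map_cons, List.map_map, List.sum_cons]
    cases u with
    | nil =>
      have h1 : (List.range o.length).map (pvStep (a :: o) [] ∘ Nat.succ)
          = (List.range o.length).map (fun _ => (1 : Int)) :=
        List.map_congr_left (fun k _ => by simp [pvStep])
      rw [h1, List.map_const', List.sum_replicate]
      simp [pvStep]
      ring
    | cons b u =>
      have h2 : (List.range o.length).map (pvStep (a :: o) (b :: u) ∘ Nat.succ)
          = (List.range o.length).map (pvStep o u) :=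
        List.map_congr_left (fun k _ => by simp [pvStep])
      rw [h2, ih u, List.zip_cons_cons, List.map_cons, List.sum_cons]
      have hhead : pvStep (a :: o) (b :: u) 0 = if a != b then (1 : Int) else 0 := by
        simp [pvStep]
      rw [hhead]
      by_cases hab : a = b <;> simp [hab] <;> ring

-- ===== VERDICT (by name: the statement is the Claim_ definition above) =====
theorem mistake_count_spec : Claim_equal_mistake_count := by
  intro original user_test _
  unfold Spec_mistake_count mistake_count mistake_count_alt
  set o := original.toList
  set u := user_test.toList
  calc (PySem.List.pyRange 0 (o.length : Int) 1).foldl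
        (fun word_mistake i =>
          match PySem.List.pyGet? o i, PySem.List.pyGet? u i with
          | some a, some b => if a != b then word_mistake + 1 else word_mistake
          | _, _ => word_mistake + 1) 0
      = (PySem.List.pyRange 0 (o.length : Int) 1).foldl
          (fun acc i => acc + pvG o u i) 0 := by
        apply PySem.List.foldl_congr_mem
        intro acc i _
        simp only [pvG]
        cases PySem.List.pyGet? o i <;> cases PySem.List.pyGet? u i <;>
          simp <;> split_ifs <;> ring
    _ = ((PySem.List.pyRange 0 (o.length : Int) 1).map (pvG o u)).sum := by
        rw [PySem.List.foldl_add]; simp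
    _ = ((List.range o.length).map (pvStep o u)).sum := by
        rw [PySem.List.pyRange_one, List.map_map]
        apply congrArg
        apply List.map_congr_left
        intro k hk
        simp only [Function.comp, pvG, pvStep, zero_add]
        rw [PySem.List.pyGet?_natCast, PySem.List.pyGet?_natCast]
    _ = (o.length : Int) - ((o.zip u).map (fun p => if p.1 == p.2 then (1 : Int) else 0)).sum :=
        pv_key o u
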